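-- pv_equiv track=rewrite | github.com/mehmet-serif21/Optik-form- | optik_form_okuyucu.py | bul_ogrenci_numarasi_konumlarini
-- ===== SOURCE A (Python) =====
-- def bul_ogrenci_numarasi_konumlarini(hane_sayisi):
--     """
--     Öğrenci numarası kutusundaki işaretleme dairelerinin merkez koordinatlarını hesaplar.
--
--     Her hane için 0-9 arası 10 daire yatay ve dikey olarak sıralanır. Daire merkezleri,
--     başlangıç koordinatına göre 25 birim aralıklarla konumlandırılır.
--
--     Parametre:
--         hane_sayisi (int): Öğrenci numarasındaki hane sayısı.
--
--     Return:
--         list[tuple[int, int]]: Her dairenin (x, y) merkez koordinatları listesi.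
--     """
--
--     konumlar = []
--     x1 = 120
--     y1 = 150
--     cap = 20
--     for sutun in range(hane_sayisi):
--         for satir in range(10):
--             konumlar.append((x1 + cap// 2, y1 + cap // 2))
--             y1 = y1 + 25
--         x1 = x1 + 25
--         y1 = 150
--     return konumlar
-- ===== SOURCE B (Python) =====
-- def bul_ogrenci_numarasi_konumlarini(hane_sayisi):
--     """Single flat pass: enumerate the 10*hane_sayisi circles by one global index k
--     and decode column/row with divmod(k, 10); no nested loops, no running state."""
--     konumlar = []
--     for k in range(10 * hane_sayisi):
--         sutun, satir = divmod(k, 10)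
--         konumlar.append((130 + 25 * sutun, 160 + 25 * satir))
--     return konumlar
-- ===== Notes on version B (the rewrite author's own statement) =====
-- stated objective: alternative
-- what changed: Replaced A's nested column/row loops with mutable accumulators x1/y1 (incremented by 25, y1 reset per column) by a single flat loop over one global circle index k, decoding (column,row) = divmod(k,10) and computing each center in closed form.
import Mathlib
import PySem

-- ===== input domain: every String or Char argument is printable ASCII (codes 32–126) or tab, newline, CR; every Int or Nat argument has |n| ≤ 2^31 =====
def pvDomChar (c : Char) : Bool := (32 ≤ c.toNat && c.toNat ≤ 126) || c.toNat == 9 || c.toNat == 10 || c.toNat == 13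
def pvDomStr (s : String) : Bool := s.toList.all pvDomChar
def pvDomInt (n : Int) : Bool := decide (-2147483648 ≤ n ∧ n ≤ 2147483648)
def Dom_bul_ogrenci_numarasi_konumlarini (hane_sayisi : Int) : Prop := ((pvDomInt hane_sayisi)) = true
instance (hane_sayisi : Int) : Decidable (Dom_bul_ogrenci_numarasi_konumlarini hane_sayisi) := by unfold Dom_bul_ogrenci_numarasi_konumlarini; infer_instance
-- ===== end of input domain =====

-- B enumerates all circles by one global index k and decodes (column,row) = divmod(k,10),
-- replacing A's nested loops with running accumulators x1/y1; objective: alternative.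

-- ===== PORT A =====
-- state: (konumlar, x1, y1); cap = 20, cap // 2 via PySem.Int.floordiv
def bul_ogrenci_numarasi_konumlarini (hane_sayisi : Int) : List (Int × Int) :=
  let cap : Int := 20
  let st :=
    (PySem.List.pyRange 0 hane_sayisi 1).foldl
      (fun (st : List (Int × Int) × Int × Int) _sutun =>
        let inner :=
          (PySem.List.pyRange 0 10 1).foldl
            (fun (p : List (Int × Int) × Int) _satir =>
              (p.1 ++ [(st.2.1 + PySem.Int.floordiv cap 2, p.2 + PySem.Int.floordiv cap 2)],
               p.2 + 25))
            (st.1, st.2.2)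
        (inner.1, st.2.1 + 25, (150 : Int)))
      ([], 120, 150)
  st.1

-- ===== PORT B =====
-- one flat loop; divmod(k, 10) via PySem.Int.divmod?, total here since 10 ≠ 0 (getD is unreachable)
def bul_ogrenci_numarasi_konumlarini_alt (hane_sayisi : Int) : List (Int × Int) :=
  (PySem.List.pyRange 0 (10 * hane_sayisi) 1).foldl
    (fun (konumlar : List (Int × Int)) k =>
      let sr := (PySem.Int.divmod? k 10).getD (0, 0)
      konumlar ++ [(130 + 25 * sr.1, 160 + 25 * sr.2)])
    []

-- ===== PRECONDITION & SPEC =====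
def Spec_bul_ogrenci_numarasi_konumlarini (hane_sayisi : Int) (out : List (Int × Int)) : Prop := out = bul_ogrenci_numarasi_konumlarini_alt hane_sayisi
instance (hane_sayisi : Int) (out : List (Int × Int)) : Decidable (Spec_bul_ogrenci_numarasi_konumlarini hane_sayisi out) := by unfold Spec_bul_ogrenci_numarasi_konumlarini; infer_instance

-- ===== CLAIM =====
def Claim_equal_bul_ogrenci_numarasi_konumlarini : Prop := ∀ (hane_sayisi : Int), Dom_bul_ogrenci_numarasi_konumlarini hane_sayisi → Spec_bul_ogrenci_numarasi_konumlarini hane_sayisi (bul_ogrenci_numarasi_konumlarini hane_sayisi)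

-- ===== LEMMAS AND PROOFS =====

-- common normal form: both sides equal this column-major flatMap of closed-form centers
def pvGrid (m : Nat) : List (Int × Int) :=
  (PySem.List.pyRange 0 (m : Int) 1).flatMap (fun sutun =>
    (PySem.List.pyRange 0 10 1).map (fun satir => (130 + 25 * sutun, 160 + 25 * satir)))

-- A's inner 10-iteration fold appends the 10 row points and leaves y1 = y + 250
lemma pv_inner_fold (k : List (Int × Int)) (x y : Int) :
    (PySem.List.pyRange 0 10 1).foldl
      (fun (p : List (Int × Int) × Int) _satir =>
        (p.1 ++ [(x + PySem.Int.floordiv 20 2, p.2 + PySem.Int.floordiv 20 2)], p.2 + 25))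
      (k, y)
    = (k ++ (PySem.List.pyRange 0 10 1).map (fun satir => (x + 10, y + 10 + 25 * satir)), y + 250) := by
  have h10 : PySem.List.pyRange 0 10 1 = [0,1,2,3,4,5,6,7,8,9] := by decide
  have hfd : PySem.Int.floordiv 20 2 = 10 := by decide
  simp [h10, List.foldl, List.map]
  refine ⟨⟨by ring, by ring, by ring, by ring, by ring, by ring, by ring, by ring, by ring⟩, by ring⟩

-- invariant of A's outer loop: after m columns, konumlar = pvGrid m, x1 = 120 + 25*m, y1 = 150
lemma pv_outer_fold (m : Nat) :
    (PySem.List.pyRange 0 (m : Int) 1).foldl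
      (fun (st : List (Int × Int) × Int × Int) _sutun =>
        let inner :=
          (PySem.List.pyRange 0 10 1).foldl
            (fun (p : List (Int × Int) × Int) _satir =>
              (p.1 ++ [(st.2.1 + PySem.Int.floordiv 20 2, p.2 + PySem.Int.floordiv 20 2)],
               p.2 + 25))
            (st.1, st.2.2)
        (inner.1, st.2.1 + 25, (150 : Int)))
      ([], 120, 150)
    = (pvGrid m, 120 + 25 * (m : Int), 150) := by
  induction m with
  | zero => decide
  | succ m ih =>
    have hsplit : PySem.List.pyRange 0 ((m : Int) + 1) 1
        = PySem.List.pyRange 0 (m : Int) 1 ++ [(m : Int)] :=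
      PySem.List.pyRange_one_succ_right (by positivity)
    unfold pvGrid
    push_cast
    rw [hsplit, List.foldl_append, List.flatMap_append, ← pvGrid, ih, List.foldl_cons, List.foldl_nil,
        List.flatMap_cons, List.flatMap_nil, List.append_nil]
    simp only [pv_inner_fold]
    refine Prod.ext ?_ (Prod.ext ?_ rfl)
    · simp only
      congr 1
      apply List.map_congr_left
      intro s _
      have : (120 : Int) + 25 * (m : Int) + 10 = 130 + 25 * (m : Int) := by ring
      rw [this]
      norm_num
    · simp only
      ring

-- B's flat fold over range(10*m) also builds pvGrid m
lemma pv_flat_fold (m : Nat) :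
    bul_ogrenci_numarasi_konumlarini_alt (m : Int) = pvGrid m := by
  induction m with
  | zero => decide
  | succ m ih =>
    have hsplit : PySem.List.pyRange 0 (10 * ((m : Int) + 1)) 1
        = PySem.List.pyRange 0 (10 * (m : Int)) 1
          ++ PySem.List.pyRange (10 * (m : Int)) (10 * (m : Int) + 10) 1 := by
      have := PySem.List.pyRange_one_append 0 (10 * (m : Int)) (10 * (m : Int) + 10)
        (by positivity) (by omega)
      rw [← this]; ring_nf
    have hblock : PySem.List.pyRange (10 * (m : Int)) (10 * (m : Int) + 10) 1
        = [10*(m:Int), 10*(m:Int)+1, 10*(m:Int)+2, 10*(m:Int)+3, 10*(m:Int)+4,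
           10*(m:Int)+5, 10*(m:Int)+6, 10*(m:Int)+7, 10*(m:Int)+8, 10*(m:Int)+9] := by
      rw [PySem.List.pyRange_one]
      simp [show Int.toNat 10 = 10 from rfl, List.range_succ]
    have hdm : ∀ j : Int, 0 ≤ j → j < 10 →
        (PySem.Int.divmod? (10 * (m : Int) + j) 10).getD (0, 0) = ((m : Int), j) := by
      intro j h0 h1
      have h10 : (10 : Int) ≠ 0 := by norm_num
      simp only [PySem.Int.divmod?, h10, if_false, Option.getD_some]
      rw [Int.fdiv_eq_ediv_of_nonneg, Int.fmod_eq_emod,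
          if_pos (Or.inl (by norm_num : (0:Int) ≤ 10))]
      simp only [Prod.mk.injEq, add_zero]
      constructor <;> omega
      norm_num
    unfold bul_ogrenci_numarasi_konumlarini_alt at ih ⊢
    push_cast
    rw [hsplit, List.foldl_append, ih]
    unfold pvGrid
    push_cast
    have hsplit2 : PySem.List.pyRange 0 ((m : Int) + 1) 1
        = PySem.List.pyRange 0 (m : Int) 1 ++ [(m : Int)] :=
      PySem.List.pyRange_one_succ_right (by positivity)
    rw [hsplit2, List.flatMap_append, ← pvGrid, List.flatMap_cons, List.flatMap_nil,
        List.append_nil, hblock]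
    have hdm0 := hdm 0 (by norm_num) (by norm_num)
    rw [add_zero] at hdm0
    simp only [List.foldl_cons, List.foldl_nil,
      hdm0, hdm 1 (by norm_num) (by norm_num),
      hdm 2 (by norm_num) (by norm_num), hdm 3 (by norm_num) (by norm_num),
      hdm 4 (by norm_num) (by norm_num), hdm 5 (by norm_num) (by norm_num),
      hdm 6 (by norm_num) (by norm_num), hdm 7 (by norm_num) (by norm_num),
      hdm 8 (by norm_num) (by norm_num), hdm 9 (by norm_num) (by norm_num)]
    have h10 : PySem.List.pyRange 0 10 1 = [0,1,2,3,4,5,6,7,8,9] := by decide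
    simp [h10, List.append_assoc]

-- ===== VERDICT =====
theorem bul_ogrenci_numarasi_konumlarini_spec : Claim_equal_bul_ogrenci_numarasi_konumlarini := by
  intro n _
  unfold Spec_bul_ogrenci_numarasi_konumlarini
  by_cases hn : n ≤ 0
  · unfold bul_ogrenci_numarasi_konumlarini bul_ogrenci_numarasi_konumlarini_alt
    have h10n : 10 * n ≤ 0 := by nlinarith
    rw [PySem.List.pyRange_one_eq_nil hn, PySem.List.pyRange_one_eq_nil h10n]
    rfl
  · obtain ⟨m, rfl⟩ : ∃ m : Nat, n = (m : Int) := ⟨n.toNat, (Int.toNat_of_nonneg (by omega)).symm⟩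
    rw [pv_flat_fold]
    unfold bul_ogrenci_numarasi_konumlarini
    simp only [pv_outer_fold]
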